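-- pv_equiv track=rewrite | github.com/LucasOl1337/LojaSync | app/application/products/service.py | _remove_digits_from_end
-- ===== SOURCE A (Python) =====
-- def _remove_digits_from_end(text: str, amount: int) -> str:
--     if amount <= 0:
--         return text
--     result: list[str] = []
--     removed = 0
--     for char in reversed(text):
--         if char.isdigit() and removed < amount:
--             removed += 1
--             continue
--         result.append(char)
--     return "".join(reversed(result))
-- ===== SOURCE B (Python) =====
-- def _remove_digits_from_end(text: str, amount: int) -> str:
--     if amount <= 0:
--         return text
--     total = sum(1 for c in text if c.isdigit())
--     keep = total - amount
--     out = []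
--     kept = 0
--     for c in text:
--         if c.isdigit():
--             if kept < keep:
--                 out.append(c)
--                 kept += 1
--         else:
--             out.append(c)
--     return "".join(out)
-- ===== Notes on version B (the rewrite author's own statement) =====
-- stated objective: alternative
-- what changed: B counts the digits first and then scans the text forward once, keeping only the first (total-amount) digits, instead of A's reversed scan that drops digits with a removed-counter and reverses the result back.
import Mathlib
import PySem

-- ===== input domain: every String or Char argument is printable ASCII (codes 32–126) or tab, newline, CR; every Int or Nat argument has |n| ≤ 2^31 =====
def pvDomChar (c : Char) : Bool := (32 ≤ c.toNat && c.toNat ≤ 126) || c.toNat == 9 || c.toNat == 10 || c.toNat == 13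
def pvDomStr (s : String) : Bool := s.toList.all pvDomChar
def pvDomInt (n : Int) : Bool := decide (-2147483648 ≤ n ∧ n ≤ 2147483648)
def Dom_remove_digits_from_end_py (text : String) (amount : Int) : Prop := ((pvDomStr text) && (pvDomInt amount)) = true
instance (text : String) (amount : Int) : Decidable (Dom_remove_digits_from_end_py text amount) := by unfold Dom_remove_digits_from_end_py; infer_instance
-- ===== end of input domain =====

-- B replaces A's reversed drop-counter scan by a digit count followed by one forward scan keeping only the first (total - amount) digits (alternative decomposition, same cost).


-- ===== PORT A =====
-- A: reversed scan dropping digits while removed < amount, then reverse back.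
def goA (amount : Int) : List Char → Int → List Char
  | [], _ => []
  | c :: cs, removed =>
      if PySem.Chars.isdigit c ∧ removed < amount then goA amount cs (removed + 1)
      else c :: goA amount cs removed

def remove_digits_from_end_py (text : String) (amount : Int) : String :=
  if amount ≤ 0 then text
  else String.mk (goA amount text.toList.reverse 0).reverse

-- ===== PORT B =====
-- B: count digits first, then one forward scan keeping only the first (total - amount) digits.
def dcount : List Char → Int
  | [] => 0
  | c :: cs => (if PySem.Chars.isdigit c then 1 else 0) + dcount cs

def goB (keep : Int) : List Char → Int → List Char
  | [], _ => []
  | c :: cs, kept =>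
      if PySem.Chars.isdigit c then
        (if kept < keep then c :: goB keep cs (kept + 1) else goB keep cs kept)
      else c :: goB keep cs kept

def remove_digits_from_end_py_alt (text : String) (amount : Int) : String :=
  if amount ≤ 0 then text
  else String.mk (goB (dcount text.toList - amount) text.toList 0)

-- ===== PRECONDITION & SPEC =====
def Spec_remove_digits_from_end_py (text : String) (amount : Int) (out : String) : Prop := out = remove_digits_from_end_py_alt text amount
instance (text : String) (amount : Int) (out : String) : Decidable (Spec_remove_digits_from_end_py text amount out) := by unfold Spec_remove_digits_from_end_py; infer_instance

-- ===== CLAIM (what is proved, stated in full; the proofs are below) =====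
def Claim_equal_remove_digits_from_end_py : Prop := ∀ (text : String) (amount : Int), Dom_remove_digits_from_end_py text amount → Spec_remove_digits_from_end_py text amount (remove_digits_from_end_py text amount)

-- ===== LEMMAS AND PROOFS =====

-- budget forms of the two loops
def goA' : Int → List Char → List Char
  | _, [] => []
  | b, c :: cs => if PySem.Chars.isdigit c ∧ 0 < b then goA' (b - 1) cs else c :: goA' b cs

def goB' : Int → List Char → List Char
  | _, [] => []
  | b, c :: cs =>
      if PySem.Chars.isdigit c then (if 0 < b then c :: goB' (b - 1) cs else goB' b cs)
      else c :: goB' b cs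

lemma goA_eq_goA' (a : Int) : ∀ (l : List Char) (r : Int), goA a l r = goA' (a - r) l := by
  intro l
  induction l with
  | nil => intro r; simp [goA, goA']
  | cons c cs ih =>
      intro r
      simp only [goA, goA']
      have h : (PySem.Chars.isdigit c ∧ r < a) ↔ (PySem.Chars.isdigit c ∧ 0 < a - r) := by
        constructor <;> rintro ⟨h1, h2⟩ <;> exact ⟨h1, by omega⟩
      by_cases hc : PySem.Chars.isdigit c ∧ r < a
      · rw [if_pos hc, if_pos (h.mp hc), ih]
        congr 1; omega
      · rw [if_neg hc, if_neg (fun hx => hc (h.mpr hx)), ih]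

lemma goB_eq_goB' (k : Int) : ∀ (l : List Char) (j : Int), goB k l j = goB' (k - j) l := by
  intro l
  induction l with
  | nil => intro j; simp [goB, goB']
  | cons c cs ih =>
      intro j
      simp only [goB, goB']
      by_cases hd : PySem.Chars.isdigit c
      · rw [if_pos hd, if_pos hd]
        by_cases hk : j < k
        · rw [if_pos hk, if_pos (show (0:Int) < k - j from by omega), ih]
          congr 2; omega
        · rw [if_neg hk, if_neg (show ¬ (0:Int) < k - j from by omega), ih]
      · rw [if_neg hd, if_neg hd, ih]

lemma dcount_nonneg : ∀ l : List Char, 0 ≤ dcount l := by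
  intro l; induction l with
  | nil => simp [dcount]
  | cons c cs ih => simp only [dcount]; split_ifs <;> omega

lemma dcount_append : ∀ xs ys : List Char, dcount (xs ++ ys) = dcount xs + dcount ys := by
  intro xs ys
  induction xs with
  | nil => simp [dcount]
  | cons c cs ih => simp only [List.cons_append, dcount, ih]; ring

lemma goB'_all (l : List Char) : ∀ b : Int, dcount l ≤ b → goB' b l = l := by
  induction l with
  | nil => intro b _; simp [goB']
  | cons c cs ih =>
      intro b hb
      simp only [dcount] at hb
      simp only [goB']
      by_cases hd : PySem.Chars.isdigit c
      · rw [if_pos hd] at hb ⊢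
        have hcs := dcount_nonneg cs
        rw [if_pos (show (0:Int) < b from by omega), ih (b-1) (by omega)]
      · rw [if_neg hd] at hb ⊢
        rw [ih b (by omega)]

lemma goB'_snoc (c : Char) : ∀ (l : List Char) (b : Int),
    goB' b (l ++ [c]) =
      goB' b l ++ (if PySem.Chars.isdigit c then (if dcount l < b then [c] else []) else [c]) := by
  intro l
  induction l with
  | nil =>
      intro b
      by_cases hdc : PySem.Chars.isdigit c <;>
        simp [goB', dcount, hdc]
  | cons c' cs ih =>
      intro b
      simp only [List.cons_append, goB', dcount]
      by_cases hd : PySem.Chars.isdigit c'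
      · simp only [hd, if_true]
        by_cases hb : (0:Int) < b
        · rw [if_pos hb, if_pos hb, ih (b-1), List.cons_append]
          congr 2
          by_cases hdc : PySem.Chars.isdigit c
          · simp only [hdc, if_true]
            by_cases h2 : dcount cs < b - 1
            · rw [if_pos h2, if_pos (show (1:Int) + dcount cs < b from by omega)]
            · rw [if_neg h2, if_neg (show ¬ (1:Int) + dcount cs < b from by omega)]
          · rw [Bool.not_eq_true] at hdc
            simp only [hdc, Bool.false_eq_true, if_false]
        · rw [if_neg hb, if_neg hb, ih b]
          congr 1
          by_cases hdc : PySem.Chars.isdigit c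
          · have h0 := dcount_nonneg cs
            simp only [hdc, if_true]
            rw [if_neg (show ¬ dcount cs < b from by omega),
                if_neg (show ¬ (1:Int) + dcount cs < b from by omega)]
          · rw [Bool.not_eq_true] at hdc
            simp only [hdc, Bool.false_eq_true, if_false]
      · rw [Bool.not_eq_true] at hd
        simp only [hd, Bool.false_eq_true, if_false]
        rw [ih b, List.cons_append]
        congr 2
        by_cases hdc : PySem.Chars.isdigit c
        · simp only [hdc, if_true]
          by_cases h2 : dcount cs < b
          · rw [if_pos h2, if_pos (show (0:Int) + dcount cs < b from by omega)]
          · rw [if_neg h2, if_neg (show ¬ (0:Int) + dcount cs < b from by omega)]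
        · rw [Bool.not_eq_true] at hdc
          simp only [hdc, Bool.false_eq_true, if_false]

lemma main_lemma : ∀ (l : List Char) (b : Int),
    (goA' b l.reverse).reverse = goB' (dcount l - b) l := by
  intro l
  induction l using List.reverseRecOn with
  | nil => intro b; simp [goA', goB']
  | append_singleton ys c ih =>
      intro b
      rw [List.reverse_append, List.reverse_singleton, List.singleton_append]
      simp only [goA']
      rw [goB'_snoc, dcount_append]
      simp only [dcount]
      by_cases hdc : PySem.Chars.isdigit c
      · simp only [hdc, if_true, true_and]
        by_cases hb : (0:Int) < b
        · rw [if_pos hb, ih (b - 1),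
            if_neg (show ¬ dcount ys < dcount ys + (1 + 0) - b from by omega),
            List.append_nil]
          congr 1; omega
        · rw [if_neg hb, List.reverse_cons, ih b,
            if_pos (show dcount ys < dcount ys + (1 + 0) - b from by omega)]
          congr 1
          rw [goB'_all ys _ (by omega), goB'_all ys _ (by omega)]
      · rw [Bool.not_eq_true] at hdc
        simp only [hdc, Bool.false_eq_true, false_and, if_neg (not_false)]
        rw [List.reverse_cons, ih b]
        have : dcount ys + ((0:Int) + 0) - b = dcount ys - b := by ring
        rw [this]

-- ===== VERDICT (by name: the statement is the Claim_ definition above) =====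
theorem remove_digits_from_end_py_spec : Claim_equal_remove_digits_from_end_py := by
  intro text amount _
  unfold Spec_remove_digits_from_end_py remove_digits_from_end_py remove_digits_from_end_py_alt
  by_cases h : amount ≤ 0
  · rw [if_pos h, if_pos h]
  · rw [if_neg h, if_neg h]
    rw [goA_eq_goA' amount text.toList.reverse 0, goB_eq_goB' (dcount text.toList - amount) text.toList 0]
    have := main_lemma text.toList amount
    simp only [Int.sub_zero]
    rw [this]
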